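-- pv_equiv track=rewrite | github.com/Macaberry/Rosalind_textbook_public | BA2/BA2F.py | score_motifs
-- ===== SOURCE A (Python) =====
-- def score_motifs(motifs): # consensus score, 복습필요
--     k = len(motifs[0])
--     consensus = ""
--     for j in range(k):
--         count = {"A":0, "C":0, "G":0, "T":0}
--         for motif in motifs:
--             count[motif[j]] += 1
--         consensus += max(count, key=count.get)
--     score = 0
--     for motif in motifs:
--         for i in range(k):
--             if motif[i] != consensus[i]:
--                 score += 1
--     return score
-- ===== SOURCE B (Python) =====
-- def score_motifs(motifs):
--     t = len(motifs)
--     return sum(t - max(col.count(c) for c in "ACGT") for col in zip(*motifs))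
-- ===== Notes on version B (the rewrite author's own statement) =====
-- stated objective: simpler
-- what changed: B drops both the consensus string and the count dict: it transposes the matrix with zip(*motifs) and sums, per column, t minus the largest of the four letter counts obtained with str.count-style counting, replacing A's dict-building pass plus consensus-rescan pass.
import Mathlib
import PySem

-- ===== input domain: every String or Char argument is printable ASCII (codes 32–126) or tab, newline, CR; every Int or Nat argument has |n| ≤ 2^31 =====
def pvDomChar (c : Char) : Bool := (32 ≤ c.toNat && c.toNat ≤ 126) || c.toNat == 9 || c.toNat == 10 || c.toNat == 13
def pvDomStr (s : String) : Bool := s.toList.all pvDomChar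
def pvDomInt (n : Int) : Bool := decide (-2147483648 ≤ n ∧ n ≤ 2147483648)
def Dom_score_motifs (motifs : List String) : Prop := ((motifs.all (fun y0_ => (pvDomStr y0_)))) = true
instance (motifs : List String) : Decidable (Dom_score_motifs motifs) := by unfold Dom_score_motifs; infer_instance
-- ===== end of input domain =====

-- B drops both the consensus string and the count dict: it transposes the matrix with
-- zip(*motifs) and sums, per column, t - max of the four letter counts; objective: simpler.

-- ===== PORT A =====
-- A, step for step: k = len(motifs[0]) (IndexError on [] excluded by Pre_); consensus built
-- by appending the argmax key of each column's count dict (count[motif[j]] += 1 is ported as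
-- Dict.modify, exact when motif[j] is one of the dict's keys — Pre_ guarantees that; Python
-- raises KeyError otherwise); then the nested mismatch count.
def score_motifs (motifs : List String) : Int :=
  let k : Int := PySem.Str.len ((PySem.List.pyGet? motifs 0).getD "")
  let consensus : List Char :=
    (PySem.List.pyRange 0 k 1).foldl (fun cons j =>
      let count : PySem.Dict Char Int :=
        motifs.foldl (fun d motif => d.modify (PySem.List.pyGetD motif.toList j ' ') 0 (· + 1))
          (PySem.Dict.ofList [('A', 0), ('C', 0), ('G', 0), ('T', 0)])
      cons ++ [(PySem.List.max? count.keys (fun c => count.getD c 0)).getD ' ']) []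
  motifs.foldl (fun score motif =>
    (PySem.List.pyRange 0 k 1).foldl (fun score i =>
      if PySem.List.pyGetD motif.toList i ' ' ≠ PySem.List.pyGetD consensus i ' '
      then score + 1 else score) score) 0

-- ===== PORT B =====
-- zip(*motifs): the columns of the matrix, cut off at the shortest row — exact port of
-- Python's zip on character rows.
def pvZipCols (rows : List (List Char)) : List (List Char) :=
  if h : rows.isEmpty || rows.any List.isEmpty then []
  else rows.map (fun r => r.headD ' ') :: pvZipCols (rows.map List.tail)
  termination_by (rows.headD []).length
  decreasing_by
    simp only [Bool.or_eq_true, List.isEmpty_iff, List.any_eq_true, not_or] at h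
    obtain ⟨h1, h2⟩ := h
    cases rows with
    | nil => exact absurd rfl h1
    | cons r rs =>
      cases r with
      | nil => exact absurd ⟨[], by simp⟩ h2
      | cons a t => simp

-- B, step for step: t = len(motifs); sum over the columns of t - max(col.count(c) for c in
-- "ACGT") (max? over a nonempty list of the four counts; the getD 0 default is never hit).
def score_motifs_alt (motifs : List String) : Int :=
  let t : Int := PySem.List.len motifs
  ((pvZipCols (motifs.map String.toList)).map (fun col =>
    t - (PySem.List.max? ("ACGT".toList.map (fun c => (col.count c : Int))) (fun v => v)).getD 0)).sum

-- ===== PRECONDITION & SPEC =====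
-- Pre_ = exactly where the Python A returns normally: motifs nonempty (else IndexError on
-- motifs[0]), every motif at least as long as motifs[0] (else IndexError on motif[j]), and
-- every character in the first len(motifs[0]) positions one of A/C/G/T (else KeyError).
def Pre_score_motifs (motifs : List String) : Prop :=
  motifs ≠ [] ∧ ∀ m ∈ motifs,
    (motifs.headD "").toList.length ≤ m.toList.length ∧
    (m.toList.take (motifs.headD "").toList.length).all
      (fun c => (['A', 'C', 'G', 'T'] : List Char).contains c) = true
instance (motifs : List String) : Decidable (Pre_score_motifs motifs) := by
  unfold Pre_score_motifs; infer_instance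
def pvWitness_score_motifs : List String := ["ACGT", "ACGA", "TCGT"]
def Spec_score_motifs (motifs : List String) (out : Int) : Prop := out = score_motifs_alt motifs
instance (motifs : List String) (out : Int) : Decidable (Spec_score_motifs motifs out) := by
  unfold Spec_score_motifs; infer_instance

-- ===== CLAIM (what is proved, stated in full; the proofs are below) =====
def Claim_equal_score_motifs : Prop := ∀ (motifs : List String), Dom_score_motifs motifs → Pre_score_motifs motifs → Spec_score_motifs motifs (score_motifs motifs)

-- ===== LEMMAS AND PROOFS =====

-- mismatch indicators sum to length minus the count of the matched character
lemma pv_sum_indicator (l : List Char) (c : Char) :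
    (l.map (fun x => if x = c then (0 : Int) else 1)).sum = (l.length : Int) - l.count c := by
  induction l with
  | nil => simp
  | cons a tl ih =>
    by_cases h : a = c <;> simp [h, ih] <;> omega

lemma pv_getD_init (c : Char) :
    (PySem.Dict.ofList [('A', (0 : Int)), ('C', 0), ('G', 0), ('T', 0)]).getD c 0 = 0 := by
  have h : (PySem.Dict.ofList [('A', (0 : Int)), ('C', 0), ('G', 0), ('T', 0)])
      = PySem.Dict.mk [('A', (0 : Int)), ('C', 0), ('G', 0), ('T', 0)] := by decide
  rw [h]
  simp only [PySem.Dict.getD_eq_get?_getD, PySem.Dict.get?_mk_cons]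
  split_ifs <;> rfl

lemma pv_update_of_mem (s : PySem.Set Char) (xs : List Char) (h : ∀ x ∈ xs, x ∈ s) :
    PySem.Set.update s xs = s := by
  induction xs generalizing s with
  | nil => rfl
  | cons a tl ih =>
    have ha : PySem.Set.add s a = s := by
      simp [PySem.Set.add, PySem.Set.contains]
      exact h a (by simp)
    simp only [PySem.Set.update, List.foldl_cons] at *
    rw [ha]
    exact ih s (fun x hx => h x (by simp [hx]))

-- the per-column count dict of A has exactly the four ACGT keys, with values the letter counts
lemma pv_vals (l : List Char)
    (hall : ∀ x ∈ l, x ∈ (['A', 'C', 'G', 'T'] : List Char))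
    (d : PySem.Dict Char Int)
    (hd : d = l.foldl (fun d x => d.modify x 0 (· + 1))
        (PySem.Dict.ofList [('A', 0), ('C', 0), ('G', 0), ('T', 0)])) :
    d.keys = ['A', 'C', 'G', 'T'] ∧ (∀ c, d.getD c 0 = (l.count c : Int)) ∧
    d.values = (['A', 'C', 'G', 'T'] : List Char).map (fun c => (l.count c : Int)) := by
  have hgetD : ∀ c, d.getD c 0 = (l.count c : Int) := by
    intro c
    rw [hd, PySem.Dict.getD_foldl_modify_add_one, pv_getD_init]
    ring
  have hkeys : d.keys = ['A', 'C', 'G', 'T'] := by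
    rw [hd, PySem.Dict.keys_foldl_modify]
    have h0 : (PySem.Dict.ofList [('A', (0:Int)), ('C', 0), ('G', 0), ('T', 0)]).keys
        = ['A', 'C', 'G', 'T'] := by decide
    rw [h0]
    exact pv_update_of_mem _ _ hall
  have hnodup : d.keys.Nodup := by rw [hkeys]; decide
  refine ⟨hkeys, hgetD, ?_⟩
  rw [PySem.Dict.values_eq_map_keys d hnodup 0, hkeys]
  exact List.map_congr_left (fun c _ => hgetD c)

-- the key value of the argmax over keys equals the maximum of the values
lemma pv_col_core (l : List Char)
    (hall : ∀ x ∈ l, x ∈ (['A', 'C', 'G', 'T'] : List Char))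
    (d : PySem.Dict Char Int)
    (hd : d = l.foldl (fun d x => d.modify x 0 (· + 1))
        (PySem.Dict.ofList [('A', 0), ('C', 0), ('G', 0), ('T', 0)])) :
    (l.map (fun x => if x = (PySem.List.max? d.keys (fun c => d.getD c 0)).getD ' '
        then (0 : Int) else 1)).sum
      = (l.length : Int) - (PySem.List.max? d.values (fun v => v)).getD 0 := by
  obtain ⟨hkeys, hgetD, hvals⟩ := pv_vals l hall d hd
  obtain ⟨cs, hcs⟩ : ∃ cs, PySem.List.max? d.keys (fun c => d.getD c 0) = some cs := by
    cases h : PySem.List.max? d.keys (fun c => d.getD c 0) with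
    | none => rw [PySem.List.max?_eq_none_iff, hkeys] at h; simp at h
    | some m => exact ⟨m, rfl⟩
  obtain ⟨v, hv⟩ : ∃ v, PySem.List.max? d.values (fun v => v) = some v := by
    cases h : PySem.List.max? d.values (fun v => v) with
    | none => rw [PySem.List.max?_eq_none_iff, hvals] at h; simp at h
    | some m => exact ⟨m, rfl⟩
  have hcv : d.getD cs 0 = v := by
    apply le_antisymm
    · exact PySem.List.max?_isMax hv _ (by
        rw [hvals]
        exact List.mem_map.mpr ⟨cs, by rw [← hkeys]; exact PySem.List.max?_mem hcs, (hgetD cs).symm⟩)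
    · have hvmem := PySem.List.max?_mem hv
      rw [hvals] at hvmem
      obtain ⟨c, hc, rfl⟩ := List.mem_map.mp hvmem
      rw [← hgetD c]
      exact PySem.List.max?_isMax hcs c (by rw [hkeys]; exact hc)
  rw [hcs, hv]
  simp only [Option.getD_some]
  exact (pv_sum_indicator l cs).trans (by rw [← hcv, hgetD])

lemma pv_sum_swap (ms : List String) (rng : List Nat) (f : String → Nat → Int) :
    (ms.map (fun m => (rng.map (f m)).sum)).sum
      = (rng.map (fun j => (ms.map (fun m => f m j)).sum)).sum := by
  induction ms with
  | nil => simp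
  | cons a tl ih => simp only [List.map_cons, List.sum_cons, ih, PySem.List.sum_map_add_int]

lemma pv_foldl_if (rng : List Nat) (p : Nat → Prop) [DecidablePred p] (s : Int) :
    rng.foldl (fun acc j => if p j then acc + 1 else acc) s
      = s + (rng.map (fun j => if p j then (1 : Int) else 0)).sum := by
  induction rng generalizing s with
  | nil => simp
  | cons a t ih => by_cases h : p a <;> simp [h, ih] <;> ring

def pvCnt (motifs : List String) (j : Int) : PySem.Dict Char Int :=
  motifs.foldl (fun d motif => d.modify (PySem.List.pyGetD motif.toList j ' ') 0 (· + 1))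
    (PySem.Dict.ofList [('A', 0), ('C', 0), ('G', 0), ('T', 0)])

def pvCstar (motifs : List String) (j : Int) : Char :=
  (PySem.List.max? (pvCnt motifs j).keys (fun c => (pvCnt motifs j).getD c 0)).getD ' '

def pvMv (motifs : List String) (j : Int) : Int :=
  (PySem.List.max? (pvCnt motifs j).values (fun v => v)).getD 0

lemma pv_main (motifs : List String) (K : Nat)
    (hall : ∀ m ∈ motifs, K ≤ m.toList.length ∧
        ∀ c ∈ m.toList.take K, c ∈ (['A', 'C', 'G', 'T'] : List Char)) :
    motifs.foldl (fun score motif => (List.range K).foldl (fun (s : Int) (jn : Nat) =>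
        if PySem.List.pyGetD motif.toList (jn : Int) ' '
            ≠ PySem.List.pyGetD ((List.range K).map (fun (j : Nat) => pvCstar motifs (j : Int))) (jn : Int) ' '
        then s + 1 else s) score) 0
      = (List.range K).foldl (fun (score : Int) (jn : Nat) =>
          score + (PySem.List.len motifs - pvMv motifs (jn : Int))) 0 := by
  rw [PySem.List.foldl_add]
  have h1 : (fun (score : Int) (motif : String) => (List.range K).foldl (fun (s : Int) (jn : Nat) =>
        if PySem.List.pyGetD motif.toList (jn : Int) ' '
            ≠ PySem.List.pyGetD ((List.range K).map (fun (j : Nat) => pvCstar motifs (j : Int))) (jn : Int) ' '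
        then s + 1 else s) score)
      = (fun score motif => score + ((List.range K).map (fun (jn : Nat) =>
          if PySem.List.pyGetD motif.toList (jn : Int) ' '
              ≠ PySem.List.pyGetD ((List.range K).map (fun (j : Nat) => pvCstar motifs (j : Int))) (jn : Int) ' '
          then (1 : Int) else 0)).sum) := by
    funext score motif
    exact pv_foldl_if _ _ _
  rw [h1, PySem.List.foldl_add, pv_sum_swap]
  congr 1
  apply congrArg List.sum
  apply List.map_congr_left
  intro jn hjn
  rw [List.mem_range] at hjn
  have hcons : PySem.List.pyGetD ((List.range K).map (fun (j : Nat) => pvCstar motifs (j : Int))) (jn : Int) ' '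
      = pvCstar motifs (jn : Int) := by
    simp [List.getD, hjn]
  have h2 : motifs.map (fun m =>
        if PySem.List.pyGetD m.toList (jn : Int) ' '
            ≠ PySem.List.pyGetD ((List.range K).map (fun (j : Nat) => pvCstar motifs (j : Int))) (jn : Int) ' '
        then (1 : Int) else 0)
      = motifs.map (fun m =>
        if PySem.List.pyGetD m.toList (jn : Int) ' ' = pvCstar motifs (jn : Int) then (0 : Int) else 1) := by
    apply List.map_congr_left
    intro m _
    rw [hcons]
    simp [ite_not]
  rw [h2]
  have hallx : ∀ x ∈ motifs.map (fun m => PySem.List.pyGetD m.toList (jn : Int) ' '),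
      x ∈ (['A', 'C', 'G', 'T'] : List Char) := by
    intro x hx
    obtain ⟨m, hm, rfl⟩ := List.mem_map.mp hx
    obtain ⟨hlen, hchars⟩ := hall m hm
    have hjm : jn < m.toList.length := lt_of_lt_of_le hjn hlen
    rw [PySem.List.pyGetD_natCast, List.getD_eq_getElem _ _ hjm]
    apply hchars
    have hjt : jn < (m.toList.take K).length := by
      rw [List.length_take]
      exact lt_min hjn hjm
    have := List.getElem_take (xs := m.toList) (i := jn) (h := hjt)
    rw [← this]
    exact List.getElem_mem hjt
  have hcore := pv_col_core (motifs.map (fun m => PySem.List.pyGetD m.toList (jn : Int) ' ')) hallx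
      (pvCnt motifs (jn : Int)) (by rw [pvCnt, List.foldl_map])
  rw [List.map_map] at hcore
  have hlen : ((motifs.map (fun m => PySem.List.pyGetD m.toList (jn : Int) ' ')).length : Int)
      = PySem.List.len motifs := by simp [PySem.List.len_eq]
  rw [hlen] at hcore
  exact hcore.trans (by rw [pvMv])

-- zip(*rows) is the list of columns, when the first row is shortest (length K ≤ all rows)
lemma pv_cols_eq (K : Nat) (rows : List (List Char)) (hne : rows ≠ [])
    (hhead : (rows.headD []).length = K)
    (hall : ∀ r ∈ rows, K ≤ r.length) :
    pvZipCols rows = (List.range K).map (fun j => rows.map (fun r => r.getD j ' ')) := by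
  induction K generalizing rows with
  | zero =>
    rw [pvZipCols]
    have : rows.any List.isEmpty = true := by
      obtain ⟨r, rs, rfl⟩ := List.exists_cons_of_ne_nil hne
      simp only [List.headD_cons] at hhead
      simp [List.eq_nil_of_length_eq_zero hhead]
    simp [this]
  | succ K ih =>
    obtain ⟨r, rs, rfl⟩ := List.exists_cons_of_ne_nil hne
    simp only [List.headD_cons] at hhead
    obtain ⟨a, r0, rfl⟩ : ∃ a r0, r = a :: r0 := by
      cases r with
      | nil => simp at hhead
      | cons a r0 => exact ⟨a, r0, rfl⟩
    have hnoemp : ((a :: r0) :: rs).any List.isEmpty = false := by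
      rw [List.any_eq_false]
      intro x hx
      have := hall x hx
      simp only [List.isEmpty_iff]
      intro hxe
      rw [hxe] at this
      simp at this
    rw [pvZipCols, dif_neg (by simp [hnoemp])]
    have htail := ih (((a :: r0) :: rs).map List.tail) (by simp)
      (by simp only [List.map_cons, List.headD_cons, List.tail_cons]
          simpa using hhead)
      (by intro x hx
          obtain ⟨y, hy, rfl⟩ := List.mem_map.mp hx
          have := hall y hy
          rw [List.length_tail]; omega)
    have hr : (List.range (K + 1)).map (fun j => ((a :: r0) :: rs).map (fun r => r.getD j ' '))
        = ((a :: r0) :: rs).map (fun r => r.getD 0 ' ')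
          :: (List.range K).map (fun j => ((a :: r0) :: rs).map (fun r => r.getD (j + 1) ' ')) := by
      rw [List.range_succ_eq_map, List.map_cons, List.map_map]
      simp [Function.comp]
    rw [htail, hr]
    congr 1
    · apply List.map_congr_left
      intro x _
      cases x <;> simp
    · apply List.map_congr_left
      intro j _
      rw [List.map_map]
      apply List.map_congr_left
      intro x _
      cases x <;> simp

theorem score_motifs_spec : Claim_equal_score_motifs := by
  intro motifs _hdom hpre
  unfold Spec_score_motifs
  obtain ⟨hne, hall⟩ := hpre
  obtain ⟨m0, ms, rfl⟩ := List.exists_cons_of_ne_nil hne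
  have hk : PySem.Str.len ((PySem.List.pyGet? (m0 :: ms) 0).getD "")
      = ((m0.toList.length : Nat) : Int) := by
    rw [PySem.List.pyGet?_zero_cons]
    simp [PySem.Str.len_eq]
  have hall2 : ∀ m ∈ (m0 :: ms), m0.toList.length ≤ m.toList.length ∧
      ∀ c ∈ m.toList.take m0.toList.length, c ∈ (['A', 'C', 'G', 'T'] : List Char) := by
    intro m hm
    obtain ⟨h1, h2⟩ := hall m hm
    refine ⟨by simpa using h1, ?_⟩
    have h2b : ∀ x ∈ List.take m0.length m.toList, x = 'A' ∨ x = 'C' ∨ x = 'G' ∨ x = 'T' := by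
      simpa using h2
    intro c hc
    rcases h2b c (by simpa [String.length_toList] using hc) with h | h | h | h <;> simp [h]
  -- A side reduces to a sum over the columns of t - max value
  have hA : score_motifs (m0 :: ms)
      = (List.range m0.toList.length).foldl (fun (score : Int) (jn : Nat) =>
          score + (PySem.List.len (m0 :: ms) - pvMv (m0 :: ms) (jn : Int))) 0 := by
    simp only [score_motifs, hk, PySem.List.pyRange_zero_nat, List.foldl_map,
      PySem.List.foldl_append_singleton_eq_map, List.nil_append]
    exact pv_main (m0 :: ms) m0.toList.length hall2
  rw [hA, PySem.List.foldl_add]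
  -- B side: the column list is the list of per-index character lists
  have hcols : pvZipCols ((m0 :: ms).map String.toList)
      = (List.range m0.toList.length).map
          (fun j => (m0 :: ms).map (fun m => m.toList.getD j ' ')) := by
    rw [pv_cols_eq m0.toList.length ((m0 :: ms).map String.toList) (by simp) (by simp)
      (by intro r hr
          obtain ⟨m, hm, rfl⟩ := List.mem_map.mp hr
          exact (hall2 m hm).1)]
    apply List.map_congr_left
    intro j _
    rw [List.map_map]
    rfl
  simp only [score_motifs_alt, hcols, List.map_map]
  rw [zero_add]
  apply congrArg List.sum
  apply List.map_congr_left
  intro jn hjn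
  rw [List.mem_range] at hjn
  -- per column: max of the dict values = max of the four letter counts
  have hallx : ∀ x ∈ (m0 :: ms).map (fun m => PySem.List.pyGetD m.toList (jn : Int) ' '),
      x ∈ (['A', 'C', 'G', 'T'] : List Char) := by
    intro x hx
    obtain ⟨m, hm, rfl⟩ := List.mem_map.mp hx
    obtain ⟨hlen, hchars⟩ := hall2 m hm
    have hjm : jn < m.toList.length := lt_of_lt_of_le hjn hlen
    rw [PySem.List.pyGetD_natCast, List.getD_eq_getElem _ _ hjm]
    apply hchars
    have hjt : jn < (m.toList.take m0.toList.length).length := by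
      rw [List.length_take]
      exact lt_min hjn hjm
    have := List.getElem_take (xs := m.toList) (i := jn) (h := hjt)
    rw [← this]
    exact List.getElem_mem hjt
  obtain ⟨_, _, hvals⟩ := pv_vals ((m0 :: ms).map (fun m => PySem.List.pyGetD m.toList (jn : Int) ' '))
    hallx (pvCnt (m0 :: ms) (jn : Int)) (by rw [pvCnt, List.foldl_map])
  have hcol : (m0 :: ms).map (fun m => m.toList.getD jn ' ')
      = (m0 :: ms).map (fun m => PySem.List.pyGetD m.toList (jn : Int) ' ') := by
    apply List.map_congr_left
    intro m _
    rw [PySem.List.pyGetD_natCast]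
  have hacgt : "ACGT".toList = (['A', 'C', 'G', 'T'] : List Char) := rfl
  simp only [Function.comp, hcol, hacgt]
  rw [pvMv, hvals]
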